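-- pv_equiv track=rewrite | github.com/ayanopt/algorithms | Finding min/max under O(n)/almost_min_file.py | almost_min
-- ===== SOURCE A (Python) =====
-- import math
--
-- def almost_min(list_in):
--     list_size = len(list_in)
--     root_size = math.log(list_size)
--     my_min = list_in[0]
--     for i in range(2,int(root_size)+1):
--         j = 1
--         while j < list_size:
--             my_min = min(list_in[j],my_min)
--             j = j*i
--     return my_min
-- ===== SOURCE B (Python) =====
-- import math
--
-- def almost_min(list_in):
--     # Scan every index and TEST whether it is a sampled one (0, or a pure power
--     # of some base i in 2..int(log n), checked by repeated division), instead of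
--     # generating the sampled indices multiplicatively as A does.
--     n = len(list_in)
--     L = int(math.log(n))
--
--     def sampled(j):
--         if j == 0:
--             return True
--         for i in range(2, L + 1):
--             k = j
--             while k % i == 0:
--                 k //= i
--             if k == 1:
--                 return True
--         return False
--
--     return min(list_in[j] for j in range(n) if sampled(j))
-- ===== Notes on version B (the rewrite author's own statement) =====
-- stated objective: alternative
-- what changed: B inverts the traversal: instead of generating sampled indices multiplicatively per base (A's nested j*=i loops fused with a running min), it scans every index j of the list once and tests membership of the sample set (j=0 or j a pure power of some base i in 2..int(log n), decided by repeated division), then takes one min over the values passing the test.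
import Mathlib
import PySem

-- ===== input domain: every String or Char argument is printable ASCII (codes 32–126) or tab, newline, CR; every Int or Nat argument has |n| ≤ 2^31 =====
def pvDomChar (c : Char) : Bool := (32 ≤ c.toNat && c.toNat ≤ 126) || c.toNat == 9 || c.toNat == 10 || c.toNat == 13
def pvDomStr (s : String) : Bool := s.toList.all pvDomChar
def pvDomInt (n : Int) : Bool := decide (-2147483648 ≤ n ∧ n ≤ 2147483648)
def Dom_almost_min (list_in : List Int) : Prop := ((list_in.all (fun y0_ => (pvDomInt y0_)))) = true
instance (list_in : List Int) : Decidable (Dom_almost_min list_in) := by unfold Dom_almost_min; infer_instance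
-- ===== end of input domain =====

-- B inverts the traversal: it scans every index once and tests sample-set membership
-- (pure power of a base, by repeated division) instead of generating the sampled
-- indices multiplicatively; alternative algorithm, no speed claim.

-- shared primitive: int(math.log(n)) for n ≥ 1, exact for n < ceil(e^23) = 9744803447
-- (⌈e^k⌉ table; int(math.log n) = floor(ln n) since ln of an integer > 1 is never
-- within double rounding error of an integer in this range)
def eCeils : List Nat := [1, 3, 8, 21, 55, 149, 404, 1097, 2981, 8104, 22027, 59875, 162755, 442414, 1202605, 3269018, 8886111, 24154953, 65659970, 178482301, 485165196, 1318815735, 3584912847]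
def lnFloor (n : Nat) : Nat := (eCeils.filter (fun c => decide (c ≤ n))).length - 1

-- ===== PORT A =====
-- the while loop: j starts at 1 and is multiplied by i ≥ 2; the extra guard
-- conjuncts 2 ≤ i ∧ 1 ≤ j only make the recursion total (they hold at every call site)
def aWhile (xs : List Int) (n i j : Nat) (m : Int) : Int :=
  if h : j < n ∧ 2 ≤ i ∧ 1 ≤ j then
    -- list_in[j]: 1 ≤ j < n = len(xs), so Python indexing = getD (never raises here)
    aWhile xs n i (j * i) (min (xs.getD j 0) m)
  else m
  termination_by n - j
  decreasing_by
    obtain ⟨h1, h2, h3⟩ := h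
    have : j * 2 ≤ j * i := Nat.mul_le_mul_left j h2
    omega

def almost_min (list_in : List Int) : Int :=
  let list_size := list_in.length
  let root_size := lnFloor list_size          -- int(math.log(list_size)); raises for the empty list (outside Pre_)
  let my_min := list_in.getD 0 0              -- list_in[0]; list_in ≠ [] by Pre_
  -- range(2, int(root_size)+1)
  (List.range' 2 (root_size - 1)).foldl (fun m i => aWhile list_in list_size i 1 m) my_min

-- ===== PORT B =====
-- the inner while loop of sampled: divide k by i while i divides it
-- (guard conjuncts 2 ≤ i ∧ 1 ≤ k only make the recursion total; they hold at every call)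
def stripDiv (k i : Nat) : Nat :=
  if h : 2 ≤ i ∧ i ∣ k ∧ 1 ≤ k then stripDiv (k / i) i else k
  termination_by k
  decreasing_by exact Nat.div_lt_self h.2.2 h.1

-- sampled(j): j == 0, or some base i in range(2, L+1) strips j down to 1
def sampledB (L j : Nat) : Bool :=
  if j == 0 then true
  else (List.range' 2 (L - 1)).any (fun i => stripDiv j i == 1)

def almost_min_alt (list_in : List Int) : Int :=
  let n := list_in.length
  let L := lnFloor n                          -- int(math.log(n)); raises for the empty list (outside Pre_)
  -- min(list_in[j] for j in range(n) if sampled(j)): list_in[j] with 0 ≤ j < n = getD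
  match ((List.range n).filter (fun j => sampledB L j)).map (fun j => list_in.getD j 0) with
  | [] => 0          -- unreachable: index 0 always passes the test
  | v :: vs => vs.foldl min v

-- ===== PRECONDITION & SPEC =====
-- Pre_ excludes only the empty list, on which both Pythons raise ValueError (math.log(0))
def Pre_almost_min (list_in : List Int) : Prop := list_in ≠ []
instance (list_in : List Int) : Decidable (Pre_almost_min list_in) := by unfold Pre_almost_min; infer_instance
def pvWitness_almost_min : List Int := [5, -3, 7, 1, 2, 4, 9, 0, 3]

def Spec_almost_min (list_in : List Int) (out : Int) : Prop := out = almost_min_alt list_in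
instance (list_in : List Int) (out : Int) : Decidable (Spec_almost_min list_in out) := by unfold Spec_almost_min; infer_instance

-- ===== CLAIM (what is proved, stated in full; the proofs are below) =====
def Claim_equal_almost_min : Prop := ∀ (list_in : List Int), Dom_almost_min list_in → Pre_almost_min list_in → Spec_almost_min list_in (almost_min list_in)

-- ===== LEMMAS AND PROOFS =====

-- the index sequence j, j*i, j*i*i, … below n, as generated by A's while loop
def seqIdx (n i j : Nat) : List Nat :=
  if h : j < n ∧ 2 ≤ i ∧ 1 ≤ j then j :: seqIdx n i (j * i) else []
  termination_by n - j
  decreasing_by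
    obtain ⟨h1, h2, h3⟩ := h
    have : j * 2 ≤ j * i := Nat.mul_le_mul_left j h2
    omega

theorem aWhile_eq_foldl (xs : List Int) (n i j : Nat) (m : Int) :
    aWhile xs n i j m = (seqIdx n i j).foldl (fun m j => min (xs.getD j 0) m) m := by
  fun_induction aWhile xs n i j m with
  | case1 j m h ih => rw [seqIdx, dif_pos h, List.foldl_cons]; exact ih
  | case2 j m h => rw [seqIdx, dif_neg h, List.foldl_nil]

-- fused fold over bases = fold over the concatenation of the per-base sequences
theorem fused_eq_flat (xs : List Int) (n : Nat) (bases : List Nat) (m : Int) :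
    bases.foldl (fun m i => aWhile xs n i 1 m) m
      = (bases.flatMap (fun i => seqIdx n i 1)).foldl (fun m j => min (xs.getD j 0) m) m := by
  induction bases generalizing m with
  | nil => rfl
  | cons b t ih =>
      rw [List.foldl_cons, ih, aWhile_eq_foldl, List.flatMap_cons, List.foldl_append]

theorem foldl_min_comm (g : Nat → Int) (l : List Nat) (v : Int) :
    l.foldl (fun m j => min (g j) m) v = l.foldl (fun m j => min m (g j)) v := by
  induction l generalizing v with
  | nil => rfl
  | cons a t ih => simp [List.foldl, min_comm]

-- foldl min computes the minimum of its seed-plus-list: it is a member and a lower bound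
theorem foldl_min_mem (a : Int) (l : List Int) : l.foldl min a ∈ a :: l := by
  induction l generalizing a with
  | nil => simp
  | cons x t ih =>
      rw [List.foldl_cons]
      rcases List.mem_cons.mp (ih (min a x)) with h | h
      · rcases min_choice a x with hc | hc
        · rw [h, hc]; exact List.mem_cons_self
        · rw [h, hc]; exact List.mem_cons_of_mem _ List.mem_cons_self
      · exact List.mem_cons_of_mem _ (List.mem_cons_of_mem _ h)

theorem foldl_min_le (a : Int) (l : List Int) : ∀ x ∈ a :: l, l.foldl min a ≤ x := by
  induction l generalizing a with
  | nil => intro x hx; rw [List.foldl_nil]; simp at hx; omega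
  | cons y t ih =>
      intro x hx
      rw [List.foldl_cons]
      have hseed : t.foldl min (min a y) ≤ min a y := ih (min a y) (min a y) (by simp)
      rcases List.mem_cons.mp hx with h | h
      · subst h; exact le_trans hseed (min_le_left _ _)
      · rcases List.mem_cons.mp h with h | h
        · subst h; exact le_trans hseed (min_le_right _ _)
        · exact ih (min a y) x (List.mem_cons_of_mem _ h)

-- two seeded lists with the same elements have the same minimum
theorem foldl_min_ext (a b : Int) (l1 l2 : List Int)
    (h : ∀ x, x ∈ a :: l1 ↔ x ∈ b :: l2) : l1.foldl min a = l2.foldl min b := by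
  apply le_antisymm
  · exact foldl_min_le a l1 _ ((h _).mpr (foldl_min_mem b l2))
  · exact foldl_min_le b l2 _ ((h _).mp (foldl_min_mem a l1))

-- membership in A's generated sequence: exactly the j·i^e below n
theorem mem_seqIdx (n i j : Nat) (hi : 2 ≤ i) :
    1 ≤ j → ∀ x, (x ∈ seqIdx n i j ↔ ∃ e, x = j * i ^ e ∧ x < n) := by
  fun_induction seqIdx n i j with
  | case1 j h ih =>
      intro hj x
      obtain ⟨hlt, -, -⟩ := h
      have hj1 : 1 ≤ j * i := by
        have := Nat.mul_le_mul hj hi; omega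
      rw [List.mem_cons, ih hj1 x]
      constructor
      · rintro (rfl | ⟨e, rfl, he⟩)
        · exact ⟨0, by simp, hlt⟩
        · exact ⟨e + 1, by ring_nf, by omega⟩
      · rintro ⟨e, rfl, he⟩
        cases e with
        | zero => left; simp
        | succ e => right; exact ⟨e, by ring_nf, by omega⟩
  | case2 j h =>
      intro hj x
      have hge : n ≤ j := by
        by_contra hc
        exact h ⟨by omega, hi, hj⟩
      simp only [List.not_mem_nil, false_iff]
      rintro ⟨e, rfl, hlt⟩
      have hp : 1 ≤ i ^ e := Nat.one_le_pow _ _ (by omega)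
      have : j ≤ j * i ^ e := Nat.le_mul_of_pos_right j (by omega)
      omega

-- repeated division by i reaches 1 exactly on the pure powers of i
theorem stripDiv_eq_one_iff (k i : Nat) (hi : 2 ≤ i) (hk : 1 ≤ k) :
    (stripDiv k i = 1 ↔ ∃ e, k = i ^ e) := by
  induction k using Nat.strong_induction_on with
  | _ k ih =>
    by_cases hd : i ∣ k
    · rw [stripDiv, dif_pos ⟨hi, hd, hk⟩]
      obtain ⟨c, rfl⟩ := hd
      have hc : 1 ≤ c := by
        rcases Nat.eq_zero_or_pos c with rfl | hpos
        · simp at hk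
        · exact hpos
      have hdiv : i * c / i = c := Nat.mul_div_cancel_left c (by omega)
      have hlt : c < i * c := by nlinarith
      rw [hdiv, ih c hlt hc]
      constructor
      · rintro ⟨e, rfl⟩; exact ⟨e + 1, by ring⟩
      · rintro ⟨e, he⟩
        cases e with
        | zero =>
            -- i * c = 1 is impossible for i ≥ 2, c ≥ 1
            simp at he; omega
        | succ e =>
            refine ⟨e, ?_⟩
            have : i * c = i * i ^ e := by rw [he]; ring
            exact Nat.eq_of_mul_eq_mul_left (by omega) this
    · rw [stripDiv, dif_neg (by tauto)]
      constructor
      · rintro rfl; exact ⟨0, rfl⟩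
      · rintro ⟨e, rfl⟩
        cases e with
        | zero => rfl
        | succ e => exact absurd (Dvd.intro (i ^ e) (by ring)) hd

-- sampledB characterised: index 0, or a pure power of some admitted base
theorem sampledB_iff (L j : Nat) :
    sampledB L j = true ↔ j = 0 ∨ ∃ i ∈ List.range' 2 (L - 1), ∃ e, j = i ^ e := by
  by_cases hj : j = 0
  · subst hj; simp [sampledB]
  · rw [sampledB, if_neg (by simpa using hj), List.any_eq_true]
    constructor
    · rintro ⟨i, hmem, hstrip⟩
      have hi : 2 ≤ i := by
        have := List.mem_range'.mp hmem; omega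
      right
      exact ⟨i, hmem, (stripDiv_eq_one_iff j i hi (by omega)).mp (by simpa using hstrip)⟩
    · rintro (rfl | ⟨i, hmem, he⟩)
      · exact absurd rfl hj
      · have hi : 2 ≤ i := by
          have := List.mem_range'.mp hmem; omega
        exact ⟨i, hmem, by simp [(stripDiv_eq_one_iff j i hi (by omega)).mpr he]⟩

-- the two index lists have the same members (n ≥ 1)
theorem index_sets_eq (n L : Nat) (hn : 1 ≤ n) (j : Nat) :
    j ∈ (0 :: (List.range' 2 (L - 1)).flatMap (fun i => seqIdx n i 1))
      ↔ j ∈ (List.range n).filter (fun j => sampledB L j) := by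
  rw [List.mem_cons, List.mem_filter, List.mem_range, sampledB_iff, List.mem_flatMap]
  constructor
  · rintro (rfl | ⟨i, hmem, hj⟩)
    · exact ⟨hn, Or.inl rfl⟩
    · have hi : 2 ≤ i := by have := List.mem_range'.mp hmem; omega
      obtain ⟨e, he, hlt⟩ := (mem_seqIdx n i 1 hi le_rfl j).mp hj
      exact ⟨hlt, Or.inr ⟨i, hmem, e, by omega⟩⟩
  · rintro ⟨hlt, rfl | ⟨i, hmem, e, rfl⟩⟩
    · exact Or.inl rfl
    · have hi : 2 ≤ i := by have := List.mem_range'.mp hmem; omega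
      exact Or.inr ⟨i, hmem, (mem_seqIdx n i 1 hi le_rfl _).mpr ⟨e, by omega, hlt⟩⟩

theorem almost_min_eq (list_in : List Int) (h : list_in ≠ []) :
    almost_min list_in = almost_min_alt list_in := by
  have hn : 1 ≤ list_in.length := List.length_pos_iff.mpr h
  have hA : almost_min list_in
      = (((List.range' 2 (lnFloor list_in.length - 1)).flatMap
            (fun i => seqIdx list_in.length i 1)).map
          (fun j => list_in.getD j 0)).foldl min (list_in.getD 0 0) := by
    show (List.range' 2 (lnFloor list_in.length - 1)).foldl
        (fun m i => aWhile list_in list_in.length i 1 m) (list_in.getD 0 0) = _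
    rw [fused_eq_flat, foldl_min_comm (fun j => list_in.getD j 0), List.foldl_map]
  have h0 : (0 : Nat) ∈ (List.range list_in.length).filter
      (fun j => sampledB (lnFloor list_in.length) j) :=
    (index_sets_eq list_in.length (lnFloor list_in.length) hn 0).mp List.mem_cons_self
  rcases hv : ((List.range list_in.length).filter
      (fun j => sampledB (lnFloor list_in.length) j)).map (fun j => list_in.getD j 0)
      with - | ⟨v, vs⟩
  · exfalso
    have := List.mem_map_of_mem (f := fun j => list_in.getD j 0) h0
    rw [hv] at this
    simp at this
  · have hB : almost_min_alt list_in = vs.foldl min v := by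
      show (match ((List.range list_in.length).filter
            (fun j => sampledB (lnFloor list_in.length) j)).map (fun j => list_in.getD j 0) with
          | [] => (0 : Int)
          | v :: vs => vs.foldl min v) = _
      rw [hv]
    rw [hA, hB]
    apply foldl_min_ext
    intro x
    have hcons : (list_in.getD 0 0
          :: ((List.range' 2 (lnFloor list_in.length - 1)).flatMap
              (fun i => seqIdx list_in.length i 1)).map (fun j => list_in.getD j 0))
        = ((0 :: (List.range' 2 (lnFloor list_in.length - 1)).flatMap
              (fun i => seqIdx list_in.length i 1)).map (fun j => list_in.getD j 0)) := rfl
    rw [hcons, ← hv]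
    simp only [List.mem_map]
    exact ⟨fun ⟨j, hj, hx⟩ =>
             ⟨j, (index_sets_eq list_in.length (lnFloor list_in.length) hn j).mp hj, hx⟩,
           fun ⟨j, hj, hx⟩ =>
             ⟨j, (index_sets_eq list_in.length (lnFloor list_in.length) hn j).mpr hj, hx⟩⟩

-- ===== VERDICT (by name: the statement is the Claim_ definition above) =====
theorem almost_min_spec : Claim_equal_almost_min := by
  intro list_in _ hpre
  exact almost_min_eq list_in hpre
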